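-- pv_equiv track=rewrite | github.com/SartoRiccardo/btd6maplist-api | database/data/gentestdata.py | num_to_letters
-- ===== SOURCE A (Python) =====
-- def num_to_letters(num: int):
--     letters = ""
--     while num > 0:
--         letters = chr(num % 10 + ord('A')) + letters
--         num = num // 10
--     letters = "A"*max(2-len(letters), 0) + letters
--     letters = "X"*max(3-len(letters), 0) + letters
--     return letters
-- ===== SOURCE B (Python) =====
-- def num_to_letters(num: int):
--     s = str(num) if num > 0 else ""
--     letters = "".join(chr(int(d) + ord('A')) for d in s)
--     letters = "A"*max(2-len(letters), 0) + letters
--     letters = "X"*max(3-len(letters), 0) + letters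
--     return letters
-- ===== Notes on version B (the rewrite author's own statement) =====
-- stated objective: idiomatic
-- what changed: B reads the digits from the decimal string representation str(num) and maps each digit character to its letter in one join, instead of A's while-loop that extracts digits arithmetically with % and // while prepending to the result.
import Mathlib
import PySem

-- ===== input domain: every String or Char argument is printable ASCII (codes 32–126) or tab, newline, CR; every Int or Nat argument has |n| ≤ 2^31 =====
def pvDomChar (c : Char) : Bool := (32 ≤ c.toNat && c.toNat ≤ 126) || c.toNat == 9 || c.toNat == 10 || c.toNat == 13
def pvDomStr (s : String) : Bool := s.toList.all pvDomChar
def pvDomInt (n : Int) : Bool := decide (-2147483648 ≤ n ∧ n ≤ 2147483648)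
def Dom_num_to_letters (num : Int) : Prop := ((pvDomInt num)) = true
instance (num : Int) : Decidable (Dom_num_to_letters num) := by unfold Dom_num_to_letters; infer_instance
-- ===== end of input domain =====

-- B converts via the decimal string str(num) instead of A's arithmetic %/// digit loop (objective: idiomatic).

-- ===== PORT A =====
-- the `while num > 0` loop of A: letters = chr(num % 10 + ord('A')) + letters; num //= 10
def numToLettersLoop (num : Int) (letters : List Char) : List Char :=
  if num > 0 then
    numToLettersLoop (PySem.Int.floordiv num 10)
      (Char.ofNat (PySem.Int.mod num 10 + 65).toNat :: letters)
  else letters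
termination_by num.toNat
decreasing_by
  have h1 : num.fdiv 10 = num / 10 := by rw [Int.fdiv_eq_ediv]; simp
  simp only [PySem.Int.floordiv, h1]
  omega

def num_to_letters (num : Int) : String :=
  let letters : List Char := numToLettersLoop num []
  let letters := List.replicate (max (2 - (letters.length : Int)) 0).toNat 'A' ++ letters
  let letters := List.replicate (max (3 - (letters.length : Int)) 0).toNat 'X' ++ letters
  String.ofList letters

-- ===== PORT B =====
-- chr(int(d) + ord('A')) for one digit character d
def digitToLetter (d : Char) : Char :=
  Char.ofNat (((PySem.Int.ofChars? [d]).getD 0) + 65).toNat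

def num_to_letters_alt (num : Int) : String :=
  let s : List Char := if num > 0 then PySem.Int.toChars num else []
  let letters : List Char := s.map digitToLetter
  let letters := List.replicate (max (2 - (letters.length : Int)) 0).toNat 'A' ++ letters
  let letters := List.replicate (max (3 - (letters.length : Int)) 0).toNat 'X' ++ letters
  String.ofList letters

-- ===== PRECONDITION & SPEC =====
def Spec_num_to_letters (num : Int) (out : String) : Prop := out = num_to_letters_alt num
instance (num : Int) (out : String) : Decidable (Spec_num_to_letters num out) := by unfold Spec_num_to_letters; infer_instance

-- ===== CLAIM (what is proved, stated in full; the proofs are below) =====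
def Claim_equal_num_to_letters : Prop := ∀ (num : Int), Dom_num_to_letters num → Spec_num_to_letters num (num_to_letters num)

-- ===== LEMMAS AND PROOFS =====

theorem toDigitsCore_append (f : Nat) : ∀ (n : Nat) (acc : List Char),
    Nat.toDigitsCore 10 f n acc = Nat.toDigitsCore 10 f n [] ++ acc := by
  induction f with
  | zero => intro n acc; simp [Nat.toDigitsCore]
  | succ f ih =>
    intro n acc
    simp only [Nat.toDigitsCore]
    split
    · simp
    · rw [ih (n / 10) [Nat.digitChar (n % 10)], ih (n / 10) (Nat.digitChar (n % 10) :: acc)]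
      simp

theorem digitToLetter_digitChar (d : Nat) (hd : d < 10) :
    digitToLetter (Nat.digitChar d) = Char.ofNat (d + 65) := by
  interval_cases d <;> decide

theorem loop_eq_toDigitsCore : ∀ (n : Nat), 0 < n → ∀ (fuel : Nat) (acc : List Char), n ≤ fuel →
    numToLettersLoop (n : Int) acc = (Nat.toDigitsCore 10 fuel n []).map digitToLetter ++ acc := by
  intro n
  induction n using Nat.strong_induction_on with
  | _ n ih =>
    intro hn fuel acc hfuel
    obtain ⟨f, rfl⟩ : ∃ f, fuel = f + 1 := ⟨fuel - 1, by omega⟩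
    rw [numToLettersLoop]
    have hdiv : PySem.Int.floordiv (n : Int) 10 = ((n / 10 : Nat) : Int) := by
      rw [PySem.Int.floordiv, Int.fdiv_eq_ediv]
      simp
    have hmod : PySem.Int.mod (n : Int) 10 = ((n % 10 : Nat) : Int) := by
      rw [PySem.Int.mod, Int.fmod_eq_emod]
      simp
    have hchar : Char.ofNat (PySem.Int.mod (n : Int) 10 + 65).toNat
        = digitToLetter (Nat.digitChar (n % 10)) := by
      rw [hmod, digitToLetter_digitChar (n % 10) (Nat.mod_lt n (by norm_num))]
      congr 1
    simp only [show ((n : Int) > 0) = True by simp; omega, if_true]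
    simp only [Nat.toDigitsCore]
    by_cases h0 : n / 10 = 0
    · simp only [h0, if_true]
      rw [hdiv, h0]
      rw [numToLettersLoop]
      simp only [Int.natCast_zero, gt_iff_lt, lt_self_iff_false, if_false]
      rw [hchar]
      simp
    · simp only [h0, if_false]
      rw [hdiv, hchar]
      rw [ih (n / 10) (by omega) (by omega) f _ (by omega),
        toDigitsCore_append f (n / 10) [Nat.digitChar (n % 10)]]
      simp

-- ===== VERDICT (by name: the statement is the Claim_ definition above) =====
theorem num_to_letters_spec : Claim_equal_num_to_letters := by
  intro num _
  unfold Spec_num_to_letters num_to_letters num_to_letters_alt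
  by_cases h : num > 0
  · obtain ⟨m, rfl⟩ : ∃ m : Nat, num = (m : Int) := ⟨num.toNat, by omega⟩
    have hm : 0 < m := by exact_mod_cast h
    have hchars : PySem.Int.toChars (m : Int) = Nat.toDigits 10 m := by
      simp [PySem.Int.toChars, show ¬ (m : Int) < 0 by omega]
    rw [if_pos h, hchars, loop_eq_toDigitsCore m hm (m + 1) [] (by omega)]
    simp [Nat.toDigits]
  · rw [if_neg h, numToLettersLoop, if_neg h]
    simp
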